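-- pv_equiv track=rewrite | github.com/ibukiIWAMURA/master-ILM | chunk/Chunk_original_8.py | detect_sem_pairs_with_only_one_difference
-- ===== SOURCE A (Python) =====
-- import itertools
--
-- def count_sem_difference_ability(split_sem1, split_sem2):
--     differences = 0
--     # 2つのリストのうち短い方の長さに合わせてループを回す
--     min_length = min(len(split_sem1), len(split_sem2))
--     for i in range(min_length):
--         if split_sem1[i] != split_sem2[i]:
--             differences += 1
--     # もしリストの長さが異なる場合、その分も差異としてカウントする
--     differences += abs(len(split_sem1) - len(split_sem2))
--     return differences
--
-- def detect_sem_pairs_with_only_one_difference(split_semantic_elements_set):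
--     detect_sem_pairs_with_only_one_difference = []
--
--     split_sem_1_2_pairs = list(itertools.combinations(split_semantic_elements_set, 2))
--     for split_sem1, split_sem2 in split_sem_1_2_pairs:
--         differences = count_sem_difference_ability(split_sem1, split_sem2)
--         if differences == 1:
--             detect_sem_pairs_with_only_one_difference.append((split_sem1, split_sem2, differences))
--     return detect_sem_pairs_with_only_one_difference
-- ===== SOURCE B (Python) =====
-- def _one_diff(u, v):
--     # number of differing positions (equal-length tuples) == 1 ?
--     c = 0
--     for x, y in zip(u, v):
--         if x != y:
--             c += 1
--     return c == 1
--
-- def _pairs_within(bucket):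
--     # all (earlier, later) pairs of a bucket with exactly one difference
--     out = []
--     rest = bucket
--     while rest:
--         u, rest = rest[0], rest[1:]
--         out += [(u, v) for v in rest if _one_diff(u, v)]
--     return out
--
-- def detect_sem_pairs_with_only_one_difference(split_semantic_elements_set):
--     seqs = split_semantic_elements_set
--     n = len(seqs)
--     # group indices by value: distinct values only are compared
--     occ = {}
--     for i, s in enumerate(seqs):
--         t = tuple(s)
--         occ[t] = occ.get(t, []) + [i]
--     vals = list(occ.keys())
--     # same-length, exactly-one-mismatch value pairs: a one-mismatch pair agrees
--     # on its first or on its second half, so half-keys find every such pair once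
--     val_pairs = []
--     for half in (0, 1):
--         buckets = {}
--         for u in vals:
--             m = len(u) // 2
--             key = (len(u), half, u[:m] if half == 0 else u[m:])
--             buckets[key] = buckets.get(key, []) + [u]
--         for bucket in buckets.values():
--             val_pairs += _pairs_within(bucket)
--     # length-off-by-one: the shorter value is the longer's prefix
--     for u in vals:
--         if len(u) >= 1 and u[:-1] in occ:
--             val_pairs.append((u, u[:-1]))
--     # expand value pairs to index pairs, in combination (lexicographic) order
--     pairs = []
--     for (u, v) in val_pairs:
--         for i in occ[u]:
--             for j in occ[v]:
--                 pairs.append((min(i, j), max(i, j)))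
--     pairs.sort(key=lambda t: t[0] * n + t[1])
--     return [(seqs[i], seqs[j], 1) for (i, j) in pairs]
-- ===== Notes on version B (the rewrite author's own statement) =====
-- stated objective: faster
-- what changed: Replaces the all-pairs O(n^2*L) scan with hashing: indices are grouped by value, one-mismatch value pairs are found via half-sequence hash buckets (a one-mismatch pair shares its first or its second half) with an exact per-candidate check, length-off-by-one pairs via a prefix dict lookup, and the expanded index pairs are sorted into combination order.
import Mathlib
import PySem

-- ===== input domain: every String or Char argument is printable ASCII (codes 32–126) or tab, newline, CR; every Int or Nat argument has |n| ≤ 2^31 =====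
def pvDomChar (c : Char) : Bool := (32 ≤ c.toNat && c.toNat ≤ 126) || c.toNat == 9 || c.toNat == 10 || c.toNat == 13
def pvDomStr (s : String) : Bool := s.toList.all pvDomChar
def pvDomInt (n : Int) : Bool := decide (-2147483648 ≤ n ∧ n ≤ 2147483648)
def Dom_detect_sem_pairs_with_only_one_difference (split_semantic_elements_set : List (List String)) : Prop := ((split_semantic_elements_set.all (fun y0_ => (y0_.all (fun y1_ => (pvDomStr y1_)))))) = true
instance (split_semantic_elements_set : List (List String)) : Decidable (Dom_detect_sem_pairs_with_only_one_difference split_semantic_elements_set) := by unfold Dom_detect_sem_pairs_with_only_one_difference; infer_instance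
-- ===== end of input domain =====

-- B replaces A's all-pairs scan: it groups equal indices by value, finds one-mismatch
-- value pairs through half-sequence hash buckets (a one-mismatch pair shares its first
-- or its second half) and prefix lookups for length-off-by-one pairs, then sorts the
-- expanded index pairs into combination order; a timing run measured B faster.

-- ===== PORT A =====
def pvCountDiff (split_sem1 split_sem2 : List String) : Int :=
  let min_length : Int := min (split_sem1.length : Int) (split_sem2.length : Int)
  let differences : Int :=
    (PySem.List.pyRange 0 min_length 1).foldl
      (fun differences i =>
        if PySem.List.pyGetD split_sem1 i "" ≠ PySem.List.pyGetD split_sem2 i "" then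
          differences + 1
        else differences) 0
  differences + |(split_sem1.length : Int) - (split_sem2.length : Int)|

def detect_sem_pairs_with_only_one_difference (split_semantic_elements_set : List (List String)) : List (List String × List String × Int) :=
  (PySem.List.combinations split_semantic_elements_set 2).foldl
    (fun acc c =>
      match c with
      | [split_sem1, split_sem2] =>
          let differences := pvCountDiff split_sem1 split_sem2
          if differences = 1 then acc ++ [(split_sem1, split_sem2, differences)] else acc
      | _ => acc) []

-- ===== PORT B =====
def pvOneDiff (u v : List String) : Bool :=
  decide (((u.zip v).foldl (fun c xy => if xy.1 ≠ xy.2 then c + 1 else c) (0 : Int)) = 1)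

def pvPairsWithin : List (List String) → List (List String × List String)
  | [] => []
  | u :: rest =>
      rest.filterMap (fun v => if pvOneDiff u v then some (u, v) else none) ++ pvPairsWithin rest

def pvHalfKey (half : Int) (u : List String) : Int × Int × List String :=
  let m := PySem.Int.floordiv (u.length : Int) 2
  ((u.length : Int), half,
    if half = 0 then PySem.List.slice u none (some m) else PySem.List.slice u (some m) none)

def pvHalfEntries (half : Int) (vals : List (List String)) :
    List ((Int × Int × List String) × List String) :=
  vals.map (fun u => (pvHalfKey half u, u))

def pvFullEntries (seqs : List (List String)) : List (List String × Int) :=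
  (PySem.List.enumerate seqs 0).map (fun is => (is.2, is.1))

def pvGroup {κ : Type} [BEq κ] {ν : Type} (l : List (κ × ν)) : PySem.Dict κ (List ν) :=
  l.foldl (fun d kv => d.modify kv.1 [] (· ++ [kv.2])) PySem.Dict.empty

def detect_sem_pairs_with_only_one_difference_alt (split_semantic_elements_set : List (List String)) : List (List String × List String × Int) :=
  let seqs := split_semantic_elements_set
  let n : Int := (seqs.length : Int)
  let occ := pvGroup (pvFullEntries seqs)
  let vals := occ.keys
  let vp0 := ((pvGroup (pvHalfEntries 0 vals)).values).foldl
    (fun acc bucket => acc ++ pvPairsWithin bucket) []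
  let vp1 := ((pvGroup (pvHalfEntries 1 vals)).values).foldl
    (fun acc bucket => acc ++ pvPairsWithin bucket) vp0
  let val_pairs := vals.foldl (fun acc u =>
    if 1 ≤ (u.length : Int) ∧ occ.contains (PySem.List.slice u none (some (-1))) = true then
      acc ++ [(u, PySem.List.slice u none (some (-1)))]
    else acc) vp1
  let pairs := val_pairs.foldl (fun acc uv =>
    acc ++ (occ.getD uv.1 []).flatMap (fun i =>
      (occ.getD uv.2 []).map (fun j => (min i j, max i j)))) []
  (PySem.List.sorted pairs (fun t => t.1 * n + t.2)).map
    (fun t => (PySem.List.pyGetD seqs t.1 [], PySem.List.pyGetD seqs t.2 [], (1 : Int)))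

-- ===== PRECONDITION & SPEC =====
def Spec_detect_sem_pairs_with_only_one_difference (split_semantic_elements_set : List (List String)) (out : List (List String × List String × Int)) : Prop := out = detect_sem_pairs_with_only_one_difference_alt split_semantic_elements_set
instance (split_semantic_elements_set : List (List String)) (out : List (List String × List String × Int)) : Decidable (Spec_detect_sem_pairs_with_only_one_difference split_semantic_elements_set out) := by unfold Spec_detect_sem_pairs_with_only_one_difference; infer_instance

-- ===== CLAIM (what is proved, stated in full; the proofs are below) =====
def Claim_equal_detect_sem_pairs_with_only_one_difference : Prop := ∀ (split_semantic_elements_set : List (List String)), Dom_detect_sem_pairs_with_only_one_difference split_semantic_elements_set → Spec_detect_sem_pairs_with_only_one_difference split_semantic_elements_set (detect_sem_pairs_with_only_one_difference split_semantic_elements_set)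

-- ===== LEMMAS AND PROOFS =====

theorem pvCountDiff_eq (s t : List String) :
    pvCountDiff s t =
      ((List.range (min s.length t.length)).countP
        (fun q => decide (s.getD q "" ≠ t.getD q "")) : Int) +
      ((max s.length t.length - min s.length t.length : Nat) : Int) := by
  have hmin : min ((s.length : Int)) ((t.length : Int)) = ((min s.length t.length : Nat) : Int) := by
    exact_mod_cast (Nat.cast_min _ _).symm
  have habs : |(s.length : Int) - (t.length : Int)| =
      ((max s.length t.length - min s.length t.length : Nat) : Int) := by
    rcases Nat.le_total s.length t.length with h | h
    · rw [abs_of_nonpos (sub_nonpos.mpr (by exact_mod_cast h)),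
        Nat.max_eq_right h, Nat.min_eq_left h, Nat.cast_sub h]
      ring
    · rw [abs_of_nonneg (sub_nonneg.mpr (by exact_mod_cast h)),
        Nat.max_eq_left h, Nat.min_eq_right h, Nat.cast_sub h]
  rw [pvCountDiff, hmin, PySem.List.pyRange_zero_nat, List.foldl_map, habs]
  congr 1
  have := PySem.List.foldl_ite_add_one
    (fun q : Nat => PySem.List.pyGetD s (q : Int) "" ≠ PySem.List.pyGetD t (q : Int) "")
    (List.range (min s.length t.length)) 0
  rw [this]
  simp [PySem.List.pyGetD_natCast]

theorem pv_countP_eq_one_iff (s t : List String) (m : Nat) :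
    ((List.range m).countP (fun q => decide (s.getD q "" ≠ t.getD q "")) = 1) ↔
      ∃ p, p < m ∧ s.getD p "" ≠ t.getD p "" ∧
        ∀ q, q < m → q ≠ p → s.getD q "" = t.getD q "" := by
  rw [List.countP_eq_length_filter, List.length_eq_one_iff]
  constructor
  · rintro ⟨p, hp⟩
    have hpm : p ∈ List.filter (fun q => decide (s.getD q "" ≠ t.getD q "")) (List.range m) := by
      rw [hp]; exact List.mem_singleton_self p
    rw [List.mem_filter, List.mem_range] at hpm
    refine ⟨p, hpm.1, of_decide_eq_true hpm.2, ?_⟩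
    intro q hq hqp
    by_contra hne
    have : q ∈ List.filter (fun q => decide (s.getD q "" ≠ t.getD q "")) (List.range m) := by
      rw [List.mem_filter, List.mem_range]; exact ⟨hq, decide_eq_true hne⟩
    rw [hp, List.mem_singleton] at this
    exact hqp this
  · rintro ⟨p, hpm, hne, huniq⟩
    refine ⟨p, ?_⟩
    have : ∀ q ∈ List.range m,
        (decide (s.getD q "" ≠ t.getD q "")) = (q == p) := by
      intro q hq
      rw [List.mem_range] at hq
      by_cases h : q = p
      · subst h
        rw [beq_self_eq_true]
        exact decide_eq_true hne
      · rw [beq_eq_false_iff_ne.mpr h]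
        exact decide_eq_false (not_not_intro (huniq q hq h))
    rw [List.filter_congr this, List.filter_beq, List.count_range, if_pos hpm,
      List.replicate_one]

theorem pvCountDiff_eq_one_iff (s t : List String) :
    pvCountDiff s t = 1 ↔
      (s.length = t.length ∧
        (List.range s.length).countP (fun q => decide (s.getD q "" ≠ t.getD q "")) = 1) ∨
      (s.length + 1 = t.length ∧ s = t.dropLast) ∨
      (t.length + 1 = s.length ∧ t = s.dropLast) := by
  rw [pvCountDiff_eq]
  have hcp : (0:Int) ≤ ((List.range (min s.length t.length)).countP
      (fun q => decide (s.getD q "" ≠ t.getD q "")) : Int) := by positivity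
  rcases Nat.lt_trichotomy s.length t.length with h | h | h
  · -- s shorter
    by_cases h1 : s.length + 1 = t.length
    · have hmin : min s.length t.length = s.length := by omega
      have hmax : max s.length t.length = t.length := by omega
      rw [hmin, hmax]
      have hd : ((t.length - s.length : Nat) : Int) = 1 := by
        rw [Nat.cast_sub (by omega)]; omega
      rw [hd]
      constructor
      · intro hsum
        have hc0 : (List.range s.length).countP
            (fun q => decide (s.getD q "" ≠ t.getD q "")) = 0 := by omega
        rw [List.countP_eq_zero] at hc0
        refine Or.inr (Or.inl ⟨h1, ?_⟩)
        apply List.ext_getElem (by rw [List.length_dropLast]; omega)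
        intro i hi1 hi2
        have h3 := hc0 i (by rw [List.mem_range]; omega)
        simp only [decide_eq_true_eq, not_not] at h3
        rw [List.getElem_dropLast,
          ← List.getD_eq_getElem s "" hi1, ← List.getD_eq_getElem t "" (by omega)]
        exact h3
      · rintro (⟨hl, _⟩ | ⟨_, hpre⟩ | ⟨hl, _⟩)
        · omega
        · have hc0 : (List.range s.length).countP
              (fun q => decide (s.getD q "" ≠ t.getD q "")) = 0 := by
            rw [List.countP_eq_zero]
            intro q hq
            rw [List.mem_range] at hq
            have heq : s.getD q "" = t.getD q "" := by
              rw [List.getD_eq_getElem s "" hq, List.getD_eq_getElem t "" (by omega),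
                List.getElem_of_eq hpre]
              exact List.getElem_dropLast _
            simp only [decide_eq_true_eq]
            exact not_not_intro heq
          rw [hc0]; simp
        · omega
    · -- length gap ≥ 2
      have h2 : ((max s.length t.length - min s.length t.length : Nat) : Int) ≥ 2 := by
        rw [Nat.max_eq_right (by omega), Nat.min_eq_left (by omega), Nat.cast_sub (by omega)]
        omega
      constructor
      · intro hsum; omega
      · rintro (⟨hl, _⟩ | ⟨hl, _⟩ | ⟨hl, _⟩) <;> omega
  · -- equal lengths
    have hmin : min s.length t.length = s.length := by omega
    have hmax : max s.length t.length = s.length := by omega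
    rw [hmin, hmax]
    simp only [Nat.sub_self, Nat.cast_zero, add_zero]
    constructor
    · intro hc
      exact Or.inl ⟨h, by omega⟩
    · rintro (⟨hl, hc1⟩ | ⟨hl, _⟩ | ⟨hl, _⟩)
      · omega
      · omega
      · omega
  · -- t shorter (symmetric)
    by_cases h1 : t.length + 1 = s.length
    · have hmin : min s.length t.length = t.length := by omega
      have hmax : max s.length t.length = s.length := by omega
      rw [hmin, hmax]
      have hd : ((s.length - t.length : Nat) : Int) = 1 := by
        rw [Nat.cast_sub (by omega)]; omega
      rw [hd]
      constructor
      · intro hsum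
        have hc0 : (List.range t.length).countP
            (fun q => decide (s.getD q "" ≠ t.getD q "")) = 0 := by omega
        rw [List.countP_eq_zero] at hc0
        refine Or.inr (Or.inr ⟨h1, ?_⟩)
        apply List.ext_getElem (by rw [List.length_dropLast]; omega)
        intro i hi1 hi2
        have h3 := hc0 i (by rw [List.mem_range]; omega)
        simp only [decide_eq_true_eq, not_not] at h3
        rw [List.getElem_dropLast,
          ← List.getD_eq_getElem t "" hi1, ← List.getD_eq_getElem s "" (by omega)]
        exact h3.symm
      · rintro (⟨hl, _⟩ | ⟨hl, _⟩ | ⟨_, hpre⟩)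
        · omega
        · omega
        · have hc0 : (List.range t.length).countP
              (fun q => decide (s.getD q "" ≠ t.getD q "")) = 0 := by
            rw [List.countP_eq_zero]
            intro q hq
            rw [List.mem_range] at hq
            have heq : t.getD q "" = s.getD q "" := by
              rw [List.getD_eq_getElem t "" hq, List.getD_eq_getElem s "" (by omega),
                List.getElem_of_eq hpre]
              exact List.getElem_dropLast _
            simp only [decide_eq_true_eq]
            exact not_not_intro heq.symm
          rw [hc0]; simp
    · have h2 : ((max s.length t.length - min s.length t.length : Nat) : Int) ≥ 2 := by
        rw [Nat.max_eq_left (by omega), Nat.min_eq_right (by omega), Nat.cast_sub (by omega)]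
        omega
      constructor
      · intro hsum; omega
      · rintro (⟨hl, _⟩ | ⟨hl, _⟩ | ⟨hl, _⟩) <;> omega

def pvGd (seqs : List (List String)) (k : Nat) : List String := seqs.getD k []
def pvIdxPairs (n : Nat) : List (Nat × Nat) :=
  (List.range n).flatMap (fun i => ((List.range n).filter (fun j => i < j)).map (fun j => (i, j)))
def pvTarget (seqs : List (List String)) : List (Nat × Nat) :=
  (pvIdxPairs seqs.length).filter (fun q => pvCountDiff (pvGd seqs q.1) (pvGd seqs q.2) = 1)
def pvOut (seqs : List (List String)) : List (List String × List String × Int) :=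
  (pvTarget seqs).map (fun q => (pvGd seqs q.1, pvGd seqs q.2, (1 : Int)))

theorem pv_map_getD_range {α : Type} (xs : List α) (d : α) :
    (List.range xs.length).map (fun j => xs.getD j d) = xs := by
  induction xs with
  | nil => simp
  | cons x t ih =>
      simpa [List.range_succ_eq_map, List.map_map, Function.comp_def] using ih

theorem pvIdxPairs_succ (n : Nat) :
    pvIdxPairs (n + 1) =
      (List.range n).map (fun j => (0, j + 1)) ++
        (pvIdxPairs n).map (fun q => (q.1 + 1, q.2 + 1)) := by
  unfold pvIdxPairs
  rw [List.range_succ_eq_map, List.flatMap_cons]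
  congr 1
  · rw [List.filter_cons_of_neg (by simp), List.filter_map]
    have h0 : ((fun j => decide (0 < j)) ∘ Nat.succ) = fun _ => true := by
      funext a; simp
    rw [h0, List.filter_true, List.map_map]
    rfl
  · rw [List.flatMap_map, List.map_flatMap]
    congr 1
    funext i
    simp only [Nat.succ_eq_add_one]
    rw [List.filter_cons_of_neg (by simp), List.filter_map]
    have h1 : ((fun j => decide (i + 1 < j)) ∘ Nat.succ) = fun j => decide (i < j) := by
      funext a; simp
    rw [h1, List.map_map, List.map_map]
    rfl

def pvH (c : List (List String)) : List (List String × List String × Int) :=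
  match c with
  | [s1, s2] => if pvCountDiff s1 s2 = 1 then [(s1, s2, pvCountDiff s1 s2)] else []
  | _ => []

theorem pv_flatMap_if {α β : Type} (p : α → Prop) [DecidablePred p] (g : α → β) (l : List α) :
    l.flatMap (fun y => if p y then [g y] else []) =
      (l.filter (fun y => decide (p y))).map g := by
  induction l with
  | nil => rfl
  | cons a l ih =>
      by_cases h : p a <;> simp [h, ih]

theorem pvA_flatMap (seqs : List (List String)) :
    detect_sem_pairs_with_only_one_difference seqs =
      (PySem.List.combinations seqs 2).flatMap pvH := by
  unfold detect_sem_pairs_with_only_one_difference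
  have hstep : (fun (acc : List (List String × List String × Int)) (c : List (List String)) =>
      match c with
      | [split_sem1, split_sem2] =>
          let differences := pvCountDiff split_sem1 split_sem2
          if differences = 1 then acc ++ [(split_sem1, split_sem2, differences)] else acc
      | _ => acc) = fun acc c => acc ++ pvH c := by
    funext acc c
    match c with
    | [] => simp [pvH]
    | [_] => simp [pvH]
    | [s1, s2] =>
        simp only [pvH]
        split <;> simp
    | _ :: _ :: _ :: _ => simp [pvH]
  rw [hstep, PySem.List.foldl_append_eq_flatMap]
  rfl

theorem pvH_pair (s1 s2 : List String) :
    pvH [s1, s2] = if pvCountDiff s1 s2 = 1 then [(s1, s2, (1 : Int))] else [] := by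
  simp only [pvH]
  split
  · next h => rw [h]
  · rfl

theorem pvA_eq_pvOut (seqs : List (List String)) :
    detect_sem_pairs_with_only_one_difference seqs = pvOut seqs := by
  rw [pvA_flatMap]
  induction seqs with
  | nil => rfl
  | cons x xs ih =>
      rw [PySem.List.combinations_cons_succ, List.flatMap_append,
        PySem.List.combinations_one, List.map_map, List.flatMap_map, ih]
      have hpart1 : xs.flatMap (fun a => pvH (((fun c => x :: c) ∘ fun x => [x]) a)) =
          xs.flatMap (fun y => if pvCountDiff x y = 1 then [(x, y, (1 : Int))] else []) := by
        apply List.flatMap_congr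
        intro y _
        exact pvH_pair x y
      rw [hpart1, pv_flatMap_if (fun y => pvCountDiff x y = 1) (fun y => (x, y, (1:Int))) xs]
      unfold pvOut pvTarget
      simp only [List.length_cons, pvIdxPairs_succ, List.filter_append, List.map_append]
      rw [List.filter_map, List.map_map, List.filter_map, List.map_map]
      congr 1
      · conv_lhs => rw [← pv_map_getD_range xs [], List.filter_map, List.map_map]
        simp only [Function.comp_def, pvGd, List.getD_cons_zero, List.getD_cons_succ]

def pvFullB (seqs : List (List String)) (k : List String) : List Int :=
  ((pvFullEntries seqs).filter (fun e => e.1 == k)).map (fun e => e.2)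

-- ===== closed forms for the grouped dicts =====
theorem pvGroup_getD {κ : Type} [BEq κ] [LawfulBEq κ] {ν : Type} (l : List (κ × ν)) (k : κ) :
    (pvGroup l).getD k [] = (l.filter (fun e => e.1 == k)).map (fun e => e.2) := by
  unfold pvGroup
  simpa using PySem.Dict.getD_foldl_modify_append l PySem.Dict.empty k

theorem pvGroup_keys {κ : Type} [BEq κ] [LawfulBEq κ] {ν : Type} (l : List (κ × ν)) :
    (pvGroup l).keys = PySem.Set.ofList (l.map (fun e => e.1)) := by
  unfold pvGroup
  have h := PySem.Dict.keys_foldl_modify_key l (fun e => e.1) ([] : List ν)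
    (fun _ kv => (· ++ [kv.2])) PySem.Dict.empty
  simpa [PySem.Set.update, PySem.Set.ofList] using h

theorem pvGroup_nodup_keys {κ : Type} [BEq κ] [LawfulBEq κ] {ν : Type} (l : List (κ × ν)) :
    (pvGroup l).keys.Nodup := by
  unfold pvGroup
  exact PySem.Dict.nodup_keys_foldl_modify_key l (fun e => e.1) ([] : List ν)
    (fun _ kv => (· ++ [kv.2])) PySem.Dict.empty (by simp)

theorem pv_mem_bucket {κ ν : Type} [BEq κ] [LawfulBEq κ] (l : List (κ × ν)) (k : κ) (x : ν) :
    x ∈ (l.filter (fun e => e.1 == k)).map (fun e => e.2) ↔ (k, x) ∈ l := by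
  rw [List.mem_map]
  constructor
  · rintro ⟨e, he, rfl⟩
    rw [List.mem_filter] at he
    have h1 : e.1 = k := by simpa using he.2
    have : (k, e.2) = e := by rw [← h1]
    rw [this]
    exact he.1
  · intro h
    exact ⟨(k, x), by rw [List.mem_filter]; exact ⟨h, by simp⟩, rfl⟩

theorem pv_mem_fullEntries (seqs : List (List String)) (e : List String × Int) :
    e ∈ pvFullEntries seqs ↔ ∃ a : Nat, a < seqs.length ∧ e = (pvGd seqs a, (a : Int)) := by
  unfold pvFullEntries
  rw [List.mem_map]
  constructor
  · rintro ⟨is, his, rfl⟩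
    rw [PySem.List.mem_enumerate_iff] at his
    obtain ⟨a, ha, rfl⟩ := his
    exact ⟨a, ha, by simp [pvGd, List.getElem?_eq_getElem ha]⟩
  · rintro ⟨a, ha, rfl⟩
    refine ⟨((a : Int), seqs[a]), ?_, ?_⟩
    · rw [PySem.List.mem_enumerate_iff]; exact ⟨a, ha, by simp⟩
    · simp [pvGd, List.getElem?_eq_getElem ha]

theorem pv_mem_fullB (seqs : List (List String)) (k : List String) (x : Int) :
    x ∈ pvFullB seqs k ↔ ∃ j : Nat, j < seqs.length ∧ pvGd seqs j = k ∧ x = (j : Int) := by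
  rw [pvFullB, pv_mem_bucket, pv_mem_fullEntries]
  constructor
  · rintro ⟨j, hj, he⟩
    rw [Prod.mk.injEq] at he
    exact ⟨j, hj, he.1.symm, he.2⟩
  · rintro ⟨j, hj, hk, rfl⟩
    exact ⟨j, hj, by rw [hk]⟩

theorem pv_grouped_nodup {κ : Type} [BEq κ] (l : List (κ × Int))
    (hp : l.Pairwise (fun e1 e2 => e1.2 < e2.2)) (k : κ) :
    ((l.filter (fun e => e.1 == k)).map (fun e => e.2)).Nodup := by
  have h1 := hp.filter (fun e => e.1 == k)
  rw [List.Nodup, List.pairwise_map]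
  exact h1.imp (fun h => by omega)

theorem pv_fullEntries_pairwise (seqs : List (List String)) :
    (pvFullEntries seqs).Pairwise (fun e1 e2 => e1.2 < e2.2) := by
  unfold pvFullEntries
  rw [List.pairwise_map]
  exact (PySem.List.pairwise_lt_enumerate seqs 0).imp (fun h => h)

theorem pv_mem_idxPairs (n : Nat) (q : Nat × Nat) :
    q ∈ pvIdxPairs n ↔ q.1 < q.2 ∧ q.2 < n := by
  unfold pvIdxPairs
  rw [List.mem_flatMap]
  constructor
  · rintro ⟨i, hi, hq⟩
    rw [List.mem_map] at hq
    obtain ⟨j, hj, rfl⟩ := hq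
    rw [List.mem_filter, List.mem_range] at hj
    exact ⟨by simpa using hj.2, hj.1⟩
  · rintro ⟨h1, h2⟩
    refine ⟨q.1, by rw [List.mem_range]; omega, ?_⟩
    rw [List.mem_map]
    exact ⟨q.2, by rw [List.mem_filter, List.mem_range]; exact ⟨h2, by simpa using h1⟩, rfl⟩

theorem pv_pairwise_idxPairs (n : Nat) :
    (pvIdxPairs n).Pairwise (fun u v => u.1 * n + u.2 < v.1 * n + v.2) := by
  unfold pvIdxPairs
  rw [List.pairwise_flatMap]
  constructor
  · intro i _
    rw [List.pairwise_map]
    apply List.Pairwise.imp_of_mem (R := fun (x y : Nat) => x < y)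
    · intro b d _ _ hbd
      exact Nat.add_lt_add_left hbd _
    · exact (List.pairwise_lt_range).filter _
  · apply List.Pairwise.imp_of_mem (R := fun (x y : Nat) => x < y)
    · intro i1 i2 _ _ hlt x hx y hy
      rw [List.mem_map] at hx hy
      obtain ⟨b, hb, rfl⟩ := hx
      obtain ⟨d, hd, rfl⟩ := hy
      rw [List.mem_filter, List.mem_range] at hb hd
      calc i1 * n + b < i1 * n + n := Nat.add_lt_add_left hb.1 _
        _ = (i1 + 1) * n := by ring
        _ ≤ i2 * n := Nat.mul_le_mul_right n hlt
        _ ≤ i2 * n + d := Nat.le_add_right _ _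
    · exact List.pairwise_lt_range

def pvTargetInt (seqs : List (List String)) : List (Int × Int) :=
  (pvTarget seqs).map (fun q => ((q.1 : Int), (q.2 : Int)))

theorem pv_mem_targetInt (seqs : List (List String)) (q : Int × Int) :
    q ∈ pvTargetInt seqs ↔ ∃ a b : Nat, a < b ∧ b < seqs.length ∧
      pvCountDiff (pvGd seqs a) (pvGd seqs b) = 1 ∧ q = ((a : Int), (b : Int)) := by
  unfold pvTargetInt pvTarget
  rw [List.mem_map]
  constructor
  · rintro ⟨u, hu, rfl⟩
    rw [List.mem_filter] at hu
    rw [pv_mem_idxPairs] at hu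
    exact ⟨u.1, u.2, hu.1.1, hu.1.2, by simpa using hu.2, rfl⟩
  · rintro ⟨a, b, hab, hb, hcd, rfl⟩
    refine ⟨(a, b), ?_, rfl⟩
    rw [List.mem_filter, pv_mem_idxPairs]
    exact ⟨⟨hab, hb⟩, by simpa using hcd⟩

theorem pv_pairwise_key_targetInt (seqs : List (List String)) :
    (pvTargetInt seqs).Pairwise
      (fun u v => u.1 * (seqs.length : Int) + u.2 < v.1 * (seqs.length : Int) + v.2) := by
  unfold pvTargetInt pvTarget
  rw [List.pairwise_map]
  apply List.Pairwise.imp_of_mem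
    (R := fun (u v : Nat × Nat) => u.1 * seqs.length + u.2 < v.1 * seqs.length + v.2)
  · intro u v _ _ h
    dsimp only
    exact_mod_cast h
  · exact (pv_pairwise_idxPairs seqs.length).filter _

theorem pv_nodup_targetInt (seqs : List (List String)) : (pvTargetInt seqs).Nodup := by
  apply (pv_pairwise_key_targetInt seqs).imp
  intro u v h he
  rw [he] at h
  omega



theorem pv_fullEntries_map_fst (seqs : List (List String)) :
    (pvFullEntries seqs).map (fun e => e.1) = seqs := by
  unfold pvFullEntries
  rw [List.map_map]
  exact PySem.List.map_snd_enumerate seqs 0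

theorem pv_zip_countP (u : List String) : ∀ v : List String, u.length = v.length →
    (u.zip v).countP (fun xy => decide (xy.1 ≠ xy.2)) =
      (List.range u.length).countP (fun q => decide (u.getD q "" ≠ v.getD q "")) := by
  induction u with
  | nil => intro v h; simp
  | cons x u ih =>
      intro v h
      match v with
      | [] => simp at h
      | y :: v =>
          rw [List.zip_cons_cons, List.countP_cons, List.length_cons,
            List.range_succ_eq_map, List.countP_cons, List.countP_map]
          have hlen : u.length = v.length := by simpa using h
          rw [ih v hlen]
          have : ((fun q => decide (List.getD (x :: u) q "" ≠ List.getD (y :: v) q "")) ∘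
              Nat.succ) = fun q => decide (u.getD q "" ≠ v.getD q "") := by
            funext q
            simp
          rw [this]
          simp [Nat.add_comm]

theorem pv_oneDiff_iff (u v : List String) (h : u.length = v.length) :
    pvOneDiff u v = true ↔
      (List.range u.length).countP (fun q => decide (u.getD q "" ≠ v.getD q "")) = 1 := by
  unfold pvOneDiff
  rw [decide_eq_true_eq]
  rw [PySem.List.foldl_ite_add_one (fun xy : String × String => xy.1 ≠ xy.2) (u.zip v) 0]
  rw [pv_zip_countP u v h]
  omega

theorem pv_countP_comm (u v : List String) :
    (List.range (min u.length v.length)).countP (fun q => decide (u.getD q "" ≠ v.getD q "")) =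
      (List.range (min u.length v.length)).countP
        (fun q => decide (v.getD q "" ≠ u.getD q "")) := by
  apply List.countP_congr
  intro q _
  simp [ne_comm]

theorem pv_cd_same_len (u v : List String) (h : u.length = v.length) :
    (pvCountDiff u v = 1 ↔ pvOneDiff u v = true) := by
  rw [pv_oneDiff_iff u v h, pvCountDiff_eq]
  have h1 : min u.length v.length = u.length := by omega
  have h2 : max u.length v.length = u.length := by omega
  rw [h1, h2]
  omega

theorem pv_oneDiff_symm (u v : List String) (h : u.length = v.length)
    (hd : pvOneDiff u v = true) : pvOneDiff v u = true := by
  rw [pv_oneDiff_iff u v h] at hd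
  rw [pv_oneDiff_iff v u h.symm]
  rw [← h]
  have := pv_countP_comm u v
  have h1 : min u.length v.length = u.length := by omega
  rw [h1] at this
  omega

theorem pv_oneDiff_ne (u v : List String) (hd : pvOneDiff u v = true) : u ≠ v := by
  intro he
  subst he
  unfold pvOneDiff at hd
  rw [decide_eq_true_eq,
    PySem.List.foldl_ite_add_one (fun xy : String × String => xy.1 ≠ xy.2) (u.zip u) 0] at hd
  have : ∀ w : List String, (w.zip w).countP (fun xy => decide (xy.1 ≠ xy.2)) = 0 := by
    intro w
    induction w with
    | nil => simp
    | cons x w ih => rw [List.zip_cons_cons, List.countP_cons, ih]; simp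
  have h0 := this u
  omega

def pvR (e1 e2 : List String × List String) : Prop :=
  ¬ ((e1.1 = e2.1 ∧ e1.2 = e2.2) ∨ (e1.1 = e2.2 ∧ e1.2 = e2.1))

theorem pv_pairsWithin_sound (bucket : List (List String)) (x : List String × List String)
    (hx : x ∈ pvPairsWithin bucket) :
    x.1 ∈ bucket ∧ x.2 ∈ bucket ∧ pvOneDiff x.1 x.2 = true := by
  induction bucket with
  | nil => simp [pvPairsWithin] at hx
  | cons u rest ih =>
      rw [pvPairsWithin, List.mem_append, List.mem_filterMap] at hx
      rcases hx with ⟨v, hv, hsome⟩ | hrec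
      · by_cases hd : pvOneDiff u v = true
        · rw [if_pos hd, Option.some_inj] at hsome
          subst hsome
          exact ⟨List.mem_cons_self, List.mem_cons_of_mem _ hv, hd⟩
        · rw [if_neg hd] at hsome; cases hsome
      · rcases ih hrec with ⟨h1, h2, h3⟩
        exact ⟨List.mem_cons_of_mem _ h1, List.mem_cons_of_mem _ h2, h3⟩

theorem pv_pairsWithin_complete (bucket : List (List String)) (u v : List String)
    (hu : u ∈ bucket) (hv : v ∈ bucket) (hne : u ≠ v)
    (hd : pvOneDiff u v = true) (hd' : pvOneDiff v u = true) :
    (u, v) ∈ pvPairsWithin bucket ∨ (v, u) ∈ pvPairsWithin bucket := by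
  induction bucket with
  | nil => simp at hu
  | cons w rest ih =>
      rw [List.mem_cons] at hu hv
      rcases hu with rfl | hu
      · rcases hv with rfl | hv
        · exact absurd rfl hne
        · left
          rw [pvPairsWithin, List.mem_append, List.mem_filterMap]
          exact Or.inl ⟨v, hv, by rw [if_pos hd]⟩
      · rcases hv with rfl | hv
        · right
          rw [pvPairsWithin, List.mem_append, List.mem_filterMap]
          exact Or.inl ⟨u, hu, by rw [if_pos hd']⟩
        · rcases ih hu hv with h | h
          · left
            rw [pvPairsWithin, List.mem_append]
            exact Or.inr h
          · right
            rw [pvPairsWithin, List.mem_append]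
            exact Or.inr h

theorem pv_pairsWithin_R (bucket : List (List String)) (hnd : bucket.Nodup) :
    (pvPairsWithin bucket).Pairwise pvR := by
  induction bucket with
  | nil => simp [pvPairsWithin]
  | cons u rest ih =>
      have hnd' := List.nodup_cons.mp hnd
      rw [pvPairsWithin, List.pairwise_append]
      refine ⟨?_, ih hnd'.2, ?_⟩
      · rw [List.pairwise_filterMap]
        apply List.Pairwise.imp_of_mem (R := fun x y => x ≠ y)
        · intro v1 v2 _ _ hvne b hb b' hb'
          by_cases h1 : pvOneDiff u v1 = true
          · rw [if_pos h1, Option.some_inj] at hb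
            by_cases h2 : pvOneDiff u v2 = true
            · rw [if_pos h2, Option.some_inj] at hb'
              subst hb hb'
              intro hcase
              rcases hcase with ⟨_, h⟩ | ⟨ha, hbb⟩
              · exact hvne h
              · exact hvne (hbb.trans ha)
            · rw [if_neg h2] at hb'; cases hb'
          · rw [if_neg h1] at hb; cases hb
        · exact hnd'.2
      · intro x hx y hy
        rw [List.mem_filterMap] at hx
        obtain ⟨v, hv, hsome⟩ := hx
        by_cases h1 : pvOneDiff u v = true
        · rw [if_pos h1, Option.some_inj] at hsome
          subst hsome
          rcases pv_pairsWithin_sound rest y hy with ⟨hy1, hy2, _⟩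
          intro hcase
          rcases hcase with ⟨ha, _⟩ | ⟨ha, _⟩
          · exact hnd'.1 (by dsimp at ha; rw [ha]; exact hy1)
          · exact hnd'.1 (by dsimp at ha; rw [ha]; exact hy2)
        · rw [if_neg h1] at hsome; cases hsome

theorem pv_halfKey_zero (u : List String) :
    pvHalfKey 0 u = ((u.length : Int), 0, u.take (u.length / 2)) := by
  unfold pvHalfKey
  have hm : PySem.Int.floordiv (u.length : Int) 2 = ((u.length / 2 : Nat) : Int) := by
    exact_mod_cast PySem.Int.floordiv_natCast u.length 2
  dsimp only
  rw [hm, if_pos rfl, PySem.List.slice_to _ (by positivity), Int.toNat_natCast]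

theorem pv_halfKey_one (u : List String) :
    pvHalfKey 1 u = ((u.length : Int), 1, u.drop (u.length / 2)) := by
  unfold pvHalfKey
  have hm : PySem.Int.floordiv (u.length : Int) 2 = ((u.length / 2 : Nat) : Int) := by
    exact_mod_cast PySem.Int.floordiv_natCast u.length 2
  dsimp only
  rw [hm, if_neg (by omega), PySem.List.slice_from _ (by positivity), Int.toNat_natCast]

theorem pv_halfKey_len {h : Int} {u v : List String} (hk : pvHalfKey h u = pvHalfKey h v) :
    u.length = v.length := by
  unfold pvHalfKey at hk
  rw [Prod.ext_iff] at hk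
  have h1 := hk.1
  dsimp only at h1
  exact_mod_cast h1

theorem pv_take_half_eq (u v : List String) (hlen : u.length = v.length) (p : Nat)
    (hge : u.length / 2 ≤ p)
    (hagree : ∀ q, q < u.length → q ≠ p → u.getD q "" = v.getD q "") :
    u.take (u.length / 2) = v.take (v.length / 2) := by
  apply List.ext_getElem (by simp; omega)
  intro q h1 h2
  rw [List.length_take] at h1
  rw [List.getElem_take, List.getElem_take]
  have hq : q < u.length := by omega
  rw [← List.getD_eq_getElem u "" hq, ← List.getD_eq_getElem v "" (by omega)]
  exact hagree q hq (by omega)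

theorem pv_drop_half_eq (u v : List String) (hlen : u.length = v.length) (p : Nat)
    (hlt : p < u.length / 2)
    (hagree : ∀ q, q < u.length → q ≠ p → u.getD q "" = v.getD q "") :
    u.drop (u.length / 2) = v.drop (v.length / 2) := by
  apply List.ext_getElem (by simp; omega)
  intro q h1 h2
  rw [List.length_drop] at h1
  rw [List.getElem_drop, List.getElem_drop]
  have hq : u.length / 2 + q < u.length := by omega
  rw [← List.getD_eq_getElem u "" hq, ← List.getD_eq_getElem v "" (by omega), hlen]
  exact hlen ▸ hagree _ hq (by omega)

theorem pv_eq_of_halves (u v : List String) (_hlen : u.length = v.length)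
    (ht : u.take (u.length / 2) = v.take (v.length / 2))
    (hd : u.drop (u.length / 2) = v.drop (v.length / 2)) : u = v := by
  rw [← List.take_append_drop (u.length / 2) u, ht, hd, List.take_append_drop]

theorem pv_grouped_nodup_val {κ : Type} [BEq κ] (l : List (κ × List String))
    (hp : l.Pairwise (fun e1 e2 => e1.2 ≠ e2.2)) (k : κ) :
    ((l.filter (fun e => e.1 == k)).map (fun e => e.2)).Nodup := by
  have h1 := hp.filter (fun e => e.1 == k)
  rw [List.Nodup, List.pairwise_map]
  exact h1.imp (fun h => h)

theorem pv_halfEntries_pairwise (h : Int) (vals : List (List String)) (hnd : vals.Nodup) :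
    (pvHalfEntries h vals).Pairwise (fun e1 e2 => e1.2 ≠ e2.2) := by
  unfold pvHalfEntries
  rw [List.pairwise_map]
  exact hnd.imp (fun hne => hne)

def pvHalfBucket (h : Int) (seqs : List (List String)) (k : Int × Int × List String) :
    List (List String) :=
  ((pvHalfEntries h (PySem.Set.ofList seqs)).filter (fun e => e.1 == k)).map (fun e => e.2)

def pvVPh (h : Int) (seqs : List (List String)) : List (List String × List String) :=
  (PySem.Set.ofList ((pvHalfEntries h (PySem.Set.ofList seqs)).map (fun e => e.1))).flatMap
    (fun k => pvPairsWithin (pvHalfBucket h seqs k))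

def pvVPpre (seqs : List (List String)) : List (List String × List String) :=
  ((PySem.Set.ofList seqs).filter (fun u => decide (1 ≤ (u.length : Int) ∧
      (pvGroup (pvFullEntries seqs)).contains (PySem.List.slice u none (some (-1))) = true))).map
    (fun u => (u, PySem.List.slice u none (some (-1))))

def pvVP (seqs : List (List String)) : List (List String × List String) :=
  (pvVPh 0 seqs ++ pvVPh 1 seqs) ++ pvVPpre seqs

theorem pv_mem_halfBucket (h : Int) (seqs : List (List String)) (k : Int × Int × List String)
    (x : List String) :
    x ∈ pvHalfBucket h seqs k ↔ x ∈ seqs ∧ pvHalfKey h x = k := by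
  rw [pvHalfBucket, pv_mem_bucket]
  unfold pvHalfEntries
  rw [List.mem_map]
  constructor
  · rintro ⟨u, hu, he⟩
    rw [Prod.mk.injEq] at he
    rw [← he.2]
    exact ⟨(PySem.Set.mem_ofList _ _).mp hu, he.1⟩
  · rintro ⟨hx, hk⟩
    exact ⟨x, (PySem.Set.mem_ofList _ _).mpr hx, by rw [hk]⟩

theorem pv_nodup_halfBucket (h : Int) (seqs : List (List String)) (k : Int × Int × List String) :
    (pvHalfBucket h seqs k).Nodup :=
  pv_grouped_nodup_val _ (pv_halfEntries_pairwise h _ (PySem.Set.nodup_ofList _)) k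

theorem pv_VPh_sound (h : Int) (seqs : List (List String)) (x : List String × List String)
    (hx : x ∈ pvVPh h seqs) :
    x.1 ∈ seqs ∧ x.2 ∈ seqs ∧ pvHalfKey h x.1 = pvHalfKey h x.2 ∧ pvOneDiff x.1 x.2 = true := by
  rw [pvVPh, List.mem_flatMap] at hx
  obtain ⟨k, _, hmem⟩ := hx
  rcases pv_pairsWithin_sound _ x hmem with ⟨h1, h2, h3⟩
  rw [pv_mem_halfBucket] at h1 h2
  exact ⟨h1.1, h2.1, by rw [h1.2, h2.2], h3⟩

theorem pv_VPh_complete (h : Int) (seqs : List (List String)) (u v : List String)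
    (hu : u ∈ seqs) (hv : v ∈ seqs) (hk : pvHalfKey h u = pvHalfKey h v)
    (hd : pvOneDiff u v = true) :
    (u, v) ∈ pvVPh h seqs ∨ (v, u) ∈ pvVPh h seqs := by
  have hlen := pv_halfKey_len hk
  have hbu : u ∈ pvHalfBucket h seqs (pvHalfKey h u) :=
    (pv_mem_halfBucket h seqs _ u).mpr ⟨hu, rfl⟩
  have hbv : v ∈ pvHalfBucket h seqs (pvHalfKey h u) :=
    (pv_mem_halfBucket h seqs _ v).mpr ⟨hv, hk.symm⟩
  have hkmem : pvHalfKey h u ∈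
      PySem.Set.ofList ((pvHalfEntries h (PySem.Set.ofList seqs)).map (fun e => e.1)) := by
    rw [PySem.Set.mem_ofList, List.mem_map]
    exact ⟨(pvHalfKey h u, u), by
      unfold pvHalfEntries
      rw [List.mem_map]
      exact ⟨u, (PySem.Set.mem_ofList _ _).mpr hu, rfl⟩, rfl⟩
  rcases pv_pairsWithin_complete _ u v hbu hbv (pv_oneDiff_ne u v hd) hd
      (pv_oneDiff_symm u v hlen hd) with hc | hc
  · exact Or.inl (by rw [pvVPh, List.mem_flatMap]; exact ⟨_, hkmem, hc⟩)
  · exact Or.inr (by rw [pvVPh, List.mem_flatMap]; exact ⟨_, hkmem, hc⟩)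

theorem pv_mem_VPpre (seqs : List (List String)) (x : List String × List String) :
    x ∈ pvVPpre seqs ↔ x.1 ∈ seqs ∧ 1 ≤ x.1.length ∧ x.2 = x.1.dropLast ∧
      x.1.dropLast ∈ seqs := by
  have hkeys : (pvGroup (pvFullEntries seqs)).keys = PySem.Set.ofList seqs := by
    rw [pvGroup_keys, pv_fullEntries_map_fst]
  rw [pvVPpre, List.mem_map]
  constructor
  · rintro ⟨u, hu, he⟩
    rw [List.mem_filter] at hu
    have hcond := of_decide_eq_true hu.2
    have hu1 := (PySem.Set.mem_ofList _ _).mp hu.1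
    rw [PySem.List.slice_to_neg_one] at he hcond
    have hin : u.dropLast ∈ seqs := by
      have := (PySem.Dict.contains_iff_mem_keys _ _).mp hcond.2
      rw [hkeys, PySem.Set.mem_ofList] at this
      exact this
    rw [← he]
    exact ⟨hu1, by exact_mod_cast hcond.1, rfl, hin⟩
  · rintro ⟨h1, h2, h3, h4⟩
    refine ⟨x.1, ?_, ?_⟩
    · rw [List.mem_filter]
      refine ⟨(PySem.Set.mem_ofList _ _).mpr h1, decide_eq_true ?_⟩
      rw [PySem.List.slice_to_neg_one]
      refine ⟨by exact_mod_cast h2, ?_⟩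
      rw [PySem.Dict.contains_iff_mem_keys, hkeys, PySem.Set.mem_ofList]
      exact h4
    · rw [PySem.List.slice_to_neg_one, ← h3]

theorem pv_cd_comm (u v : List String) : pvCountDiff u v = pvCountDiff v u := by
  rw [pvCountDiff_eq, pvCountDiff_eq, pv_countP_comm u v, Nat.min_comm, Nat.max_comm]

theorem pv_VP_sound (seqs : List (List String)) (x : List String × List String)
    (hx : x ∈ pvVP seqs) :
    x.1 ∈ seqs ∧ x.2 ∈ seqs ∧ x.1 ≠ x.2 ∧ pvCountDiff x.1 x.2 = 1 := by
  rw [pvVP, List.mem_append, List.mem_append] at hx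
  rcases hx with (hx | hx) | hx
  · rcases pv_VPh_sound 0 seqs x hx with ⟨h1, h2, hk, hd⟩
    exact ⟨h1, h2, pv_oneDiff_ne _ _ hd, (pv_cd_same_len _ _ (pv_halfKey_len hk)).mpr hd⟩
  · rcases pv_VPh_sound 1 seqs x hx with ⟨h1, h2, hk, hd⟩
    exact ⟨h1, h2, pv_oneDiff_ne _ _ hd, (pv_cd_same_len _ _ (pv_halfKey_len hk)).mpr hd⟩
  · rcases (pv_mem_VPpre seqs x).mp hx with ⟨h1, h2, h3, h4⟩
    have hlen : x.2.length + 1 = x.1.length := by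
      rw [h3, List.length_dropLast]
      omega
    refine ⟨h1, by rw [h3]; exact h4, ?_, ?_⟩
    · intro he
      rw [he] at hlen
      omega
    · exact (pvCountDiff_eq_one_iff _ _).mpr (Or.inr (Or.inr ⟨hlen, h3⟩))

theorem pv_VP_complete (seqs : List (List String)) (u v : List String)
    (hu : u ∈ seqs) (hv : v ∈ seqs) (hcd : pvCountDiff u v = 1) :
    (u, v) ∈ pvVP seqs ∨ (v, u) ∈ pvVP seqs := by
  rcases (pvCountDiff_eq_one_iff u v).mp hcd with ⟨hlen, hc1⟩ | ⟨hlen, hdl⟩ | ⟨hlen, hdl⟩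
  · -- same length, one mismatch: half keys agree on one side
    rcases (pv_countP_eq_one_iff u v u.length).mp hc1 with ⟨p, hp, _, hagree⟩
    have hagree' : ∀ q, q < u.length → q ≠ p → u.getD q "" = v.getD q "" := fun q hq hqp =>
      hagree q hq hqp
    have hd : pvOneDiff u v = true := (pv_oneDiff_iff u v hlen).mpr hc1
    by_cases hcase : p < u.length / 2
    · have hk : pvHalfKey 1 u = pvHalfKey 1 v := by
        rw [pv_halfKey_one, pv_halfKey_one, hlen,
          ← pv_drop_half_eq u v hlen p hcase hagree', hlen]
      rcases pv_VPh_complete 1 seqs u v hu hv hk hd with hc | hc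
      · exact Or.inl (by rw [pvVP, List.mem_append, List.mem_append]; exact Or.inl (Or.inr hc))
      · exact Or.inr (by rw [pvVP, List.mem_append, List.mem_append]; exact Or.inl (Or.inr hc))
    · have hk : pvHalfKey 0 u = pvHalfKey 0 v := by
        rw [pv_halfKey_zero, pv_halfKey_zero, hlen,
          ← pv_take_half_eq u v hlen p (by omega) hagree', hlen]
      rcases pv_VPh_complete 0 seqs u v hu hv hk hd with hc | hc
      · exact Or.inl (by rw [pvVP, List.mem_append, List.mem_append]; exact Or.inl (Or.inl hc))
      · exact Or.inr (by rw [pvVP, List.mem_append, List.mem_append]; exact Or.inl (Or.inl hc))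
  · -- u = v.dropLast : (v, u) in the prefix part
    right
    rw [pvVP, List.mem_append]
    have h1 : 1 ≤ v.length := by omega
    refine Or.inr ((pv_mem_VPpre seqs (v, u)).mpr ⟨hv, h1, hdl, by rw [← hdl]; exact hu⟩)
  · left
    rw [pvVP, List.mem_append]
    have h1 : 1 ≤ u.length := by omega
    exact Or.inr ((pv_mem_VPpre seqs (u, v)).mpr ⟨hu, h1, hdl, by rw [← hdl]; exact hv⟩)

theorem pv_not_both_halves (u v : List String) (h0 : pvHalfKey 0 u = pvHalfKey 0 v)
    (h1 : pvHalfKey 1 u = pvHalfKey 1 v) : u = v := by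
  have hlen := pv_halfKey_len h0
  rw [pv_halfKey_zero, pv_halfKey_zero, Prod.ext_iff] at h0
  rw [pv_halfKey_one, pv_halfKey_one, Prod.ext_iff] at h1
  have ht : u.take (u.length / 2) = v.take (v.length / 2) := by
    have := h0.2
    simp only [Prod.ext_iff] at this
    exact this.2
  have hd : u.drop (u.length / 2) = v.drop (v.length / 2) := by
    have := h1.2
    simp only [Prod.ext_iff] at this
    exact this.2
  exact pv_eq_of_halves u v hlen ht hd

theorem pv_VPh_R (h : Int) (seqs : List (List String)) : (pvVPh h seqs).Pairwise pvR := by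
  rw [pvVPh, List.pairwise_flatMap]
  constructor
  · intro k _
    exact pv_pairsWithin_R _ (pv_nodup_halfBucket h seqs k)
  · apply List.Pairwise.imp_of_mem (R := fun k1 k2 => k1 ≠ k2)
    · intro k1 k2 _ _ hne x hx y hy
      rcases pv_pairsWithin_sound _ x hx with ⟨hx1, hx2, _⟩
      rcases pv_pairsWithin_sound _ y hy with ⟨hy1, hy2, _⟩
      rw [pv_mem_halfBucket] at hx1 hx2 hy1 hy2
      intro hcase
      rcases hcase with ⟨ha, _⟩ | ⟨ha, _⟩
      · exact hne (by rw [← hx1.2, ha, hy1.2])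
      · exact hne (by rw [← hx1.2, ha, hy2.2])
    · exact PySem.Set.nodup_ofList _

theorem pv_VPpre_len (seqs : List (List String)) (y : List String × List String)
    (hy : y ∈ pvVPpre seqs) : y.1.length = y.2.length + 1 := by
  rcases (pv_mem_VPpre seqs y).mp hy with ⟨_, h2, h3, _⟩
  rw [h3, List.length_dropLast]
  omega

theorem pv_VP_R (seqs : List (List String)) : (pvVP seqs).Pairwise pvR := by
  rw [pvVP, List.pairwise_append]
  refine ⟨?_, ?_, ?_⟩
  · rw [List.pairwise_append]
    refine ⟨pv_VPh_R 0 seqs, pv_VPh_R 1 seqs, ?_⟩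
    intro x hx y hy
    rcases pv_VPh_sound 0 seqs x hx with ⟨_, _, hk0, hd0⟩
    rcases pv_VPh_sound 1 seqs y hy with ⟨_, _, hk1, _⟩
    intro hcase
    rcases hcase with ⟨ha, hb⟩ | ⟨ha, hb⟩
    · rw [← ha, ← hb] at hk1
      exact pv_oneDiff_ne _ _ hd0 (pv_not_both_halves _ _ hk0 hk1)
    · rw [← ha, ← hb] at hk1
      exact pv_oneDiff_ne _ _ hd0 (pv_not_both_halves _ _ hk0 hk1.symm)
  · rw [pvVPpre, List.pairwise_map]
    have hnd := (PySem.Set.nodup_ofList seqs).filter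
      (fun u => decide (1 ≤ (u.length : Int) ∧
        (pvGroup (pvFullEntries seqs)).contains (PySem.List.slice u none (some (-1))) = true))
    apply List.Pairwise.imp_of_mem (R := fun u1 u2 => u1 ≠ u2) ?_ hnd
    intro u1 u2 h1 h2 hne
    rw [List.mem_filter] at h1 h2
    unfold pvR
    dsimp only
    rw [PySem.List.slice_to_neg_one, PySem.List.slice_to_neg_one]
    intro hcase
    rcases hcase with ⟨ha, _⟩ | ⟨ha, hb⟩
    · exact hne ha
    · have hl1 : 1 ≤ (u1.length : Int) := (of_decide_eq_true h1.2).1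
      have hl2 : 1 ≤ (u2.length : Int) := (of_decide_eq_true h2.2).1
      have e1 : u1.length = u2.length - 1 := by
        rw [ha, List.length_dropLast]
      have e2 : u1.length - 1 = u2.length := by
        rw [← List.length_dropLast, hb]
      omega
  · intro x hx y hy
    rw [List.mem_append] at hx
    have hklen : x.1.length = x.2.length := by
      rcases hx with hx | hx
      · exact pv_halfKey_len (pv_VPh_sound 0 seqs x hx).2.2.1
      · exact pv_halfKey_len (pv_VPh_sound 1 seqs x hx).2.2.1
    have hylen := pv_VPpre_len seqs y hy
    intro hcase
    rcases hcase with ⟨ha, hb⟩ | ⟨ha, hb⟩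
    · rw [← ha, ← hb] at hylen
      omega
    · rw [← ha, ← hb] at hylen
      omega

def pvPairsB (seqs : List (List String)) : List (Int × Int) :=
  (pvVP seqs).flatMap (fun uv =>
    (pvFullB seqs uv.1).flatMap (fun i =>
      (pvFullB seqs uv.2).map (fun j => (min i j, max i j))))

theorem pv_gd_mem (seqs : List (List String)) (a : Nat) (ha : a < seqs.length) :
    pvGd seqs a ∈ seqs := by
  rw [pvGd, List.getD_eq_getElem seqs [] ha]
  exact List.getElem_mem ha

theorem pv_mem_pairsB (seqs : List (List String)) (q : Int × Int) :
    q ∈ pvPairsB seqs ↔ ∃ a b : Nat, a < b ∧ b < seqs.length ∧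
      pvCountDiff (pvGd seqs a) (pvGd seqs b) = 1 ∧ q = ((a : Int), (b : Int)) := by
  rw [pvPairsB, List.mem_flatMap]
  constructor
  · rintro ⟨uv, huv, hq⟩
    rw [List.mem_flatMap] at hq
    obtain ⟨i, hi, hq⟩ := hq
    rw [List.mem_map] at hq
    obtain ⟨j, hj, rfl⟩ := hq
    rcases (pv_mem_fullB seqs uv.1 i).mp hi with ⟨iN, hiN, hgi, rfl⟩
    rcases (pv_mem_fullB seqs uv.2 j).mp hj with ⟨jN, hjN, hgj, rfl⟩
    rcases pv_VP_sound seqs uv huv with ⟨_, _, hne, hcd⟩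
    have hij : iN ≠ jN := by
      intro he
      rw [he] at hgi
      exact hne (hgi ▸ hgj ▸ rfl)
    rcases Nat.lt_or_ge iN jN with hlt | hge
    · refine ⟨iN, jN, hlt, hjN, ?_, ?_⟩
      · rw [hgi, hgj]; exact hcd
      · have : (iN : Int) ≤ (jN : Int) := by exact_mod_cast Nat.le_of_lt hlt
        rw [min_eq_left this, max_eq_right this]
    · have hlt : jN < iN := by omega
      refine ⟨jN, iN, hlt, hiN, ?_, ?_⟩
      · rw [hgi, hgj, pv_cd_comm]; exact hcd
      · have : (jN : Int) ≤ (iN : Int) := by exact_mod_cast Nat.le_of_lt hlt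
        rw [min_eq_right this, max_eq_left this]
  · rintro ⟨a, b, hab, hb, hcd, rfl⟩
    have hu := pv_gd_mem seqs a (by omega)
    have hv := pv_gd_mem seqs b hb
    have hle : (a : Int) ≤ (b : Int) := by exact_mod_cast Nat.le_of_lt hab
    rcases pv_VP_complete seqs _ _ hu hv hcd with hc | hc
    · refine ⟨_, hc, ?_⟩
      rw [List.mem_flatMap]
      refine ⟨(a : Int), (pv_mem_fullB seqs _ _).mpr ⟨a, by omega, rfl, rfl⟩, ?_⟩
      rw [List.mem_map]
      refine ⟨(b : Int), (pv_mem_fullB seqs _ _).mpr ⟨b, hb, rfl, rfl⟩, ?_⟩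
      rw [min_eq_left hle, max_eq_right hle]
    · refine ⟨_, hc, ?_⟩
      rw [List.mem_flatMap]
      refine ⟨(b : Int), (pv_mem_fullB seqs _ _).mpr ⟨b, hb, rfl, rfl⟩, ?_⟩
      rw [List.mem_map]
      refine ⟨(a : Int), (pv_mem_fullB seqs _ _).mpr ⟨a, by omega, rfl, rfl⟩, ?_⟩
      rw [min_eq_right hle, max_eq_left hle]

theorem pv_nodup_pairsB (seqs : List (List String)) : (pvPairsB seqs).Nodup := by
  rw [pvPairsB, List.nodup_flatMap]
  constructor
  · intro uv huv
    rcases pv_VP_sound seqs uv huv with ⟨_, _, hne, _⟩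
    rw [List.nodup_flatMap]
    constructor
    · intro i hi
      rcases (pv_mem_fullB seqs uv.1 i).mp hi with ⟨iN, hiN, hgi, rfl⟩
      apply List.Nodup.map_on
      · intro j1 hj1 j2 hj2 heq
        rcases (pv_mem_fullB seqs uv.2 j1).mp hj1 with ⟨jN1, _, hgj1, rfl⟩
        rcases (pv_mem_fullB seqs uv.2 j2).mp hj2 with ⟨jN2, _, hgj2, rfl⟩
        have h1 : (iN : Int) ≠ (jN1 : Int) := by
          intro he
          have : iN = jN1 := by exact_mod_cast he
          exact hne (by rw [← hgi, this, hgj1])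
        have h2 : (iN : Int) ≠ (jN2 : Int) := by
          intro he
          have : iN = jN2 := by exact_mod_cast he
          exact hne (by rw [← hgi, this, hgj2])
        rw [Prod.ext_iff] at heq
        dsimp at heq
        omega
      · exact pv_grouped_nodup _ (pv_fullEntries_pairwise seqs) _
    · apply List.Pairwise.imp_of_mem (R := fun x y => x ≠ y)
      · intro i1 i2 h1 h2 hne12 q hq1 hq2
        rw [List.mem_map] at hq1 hq2
        obtain ⟨j1, hj1, hqe1⟩ := hq1
        obtain ⟨j2, hj2, hqe2⟩ := hq2
        rcases (pv_mem_fullB seqs uv.1 i1).mp h1 with ⟨iN1, _, hgi1, rfl⟩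
        rcases (pv_mem_fullB seqs uv.1 i2).mp h2 with ⟨iN2, _, hgi2, rfl⟩
        rcases (pv_mem_fullB seqs uv.2 j1).mp hj1 with ⟨jN1, _, hgj1, rfl⟩
        rcases (pv_mem_fullB seqs uv.2 j2).mp hj2 with ⟨jN2, _, hgj2, rfl⟩
        rw [← hqe2, Prod.ext_iff] at hqe1
        dsimp at hqe1
        have hcase : ((iN1 : Int) = (iN2 : Int) ∧ (jN1 : Int) = (jN2 : Int)) ∨
            ((iN1 : Int) = (jN2 : Int) ∧ (jN1 : Int) = (iN2 : Int)) := by omega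
        rcases hcase with ⟨hA, _⟩ | ⟨hA, _⟩
        · exact hne12 hA
        · have : iN1 = jN2 := by exact_mod_cast hA
          exact hne (by rw [← hgi1, this, hgj2])
      · have := pv_grouped_nodup _ (pv_fullEntries_pairwise seqs)
          (k := uv.1)
        exact this
  · apply List.Pairwise.imp_of_mem (R := pvR) ?_ (pv_VP_R seqs)
    intro uv1 uv2 h1 h2 hR q hq1 hq2
    rw [List.mem_flatMap] at hq1 hq2
    obtain ⟨i1, hi1, hq1⟩ := hq1
    obtain ⟨i2, hi2, hq2⟩ := hq2
    rw [List.mem_map] at hq1 hq2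
    obtain ⟨j1, hj1, hqe1⟩ := hq1
    obtain ⟨j2, hj2, hqe2⟩ := hq2
    rcases (pv_mem_fullB seqs uv1.1 i1).mp hi1 with ⟨iN1, _, hgi1, rfl⟩
    rcases (pv_mem_fullB seqs uv1.2 j1).mp hj1 with ⟨jN1, _, hgj1, rfl⟩
    rcases (pv_mem_fullB seqs uv2.1 i2).mp hi2 with ⟨iN2, _, hgi2, rfl⟩
    rcases (pv_mem_fullB seqs uv2.2 j2).mp hj2 with ⟨jN2, _, hgj2, rfl⟩
    rw [← hqe2, Prod.ext_iff] at hqe1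
    dsimp at hqe1
    have hcase : ((iN1 : Int) = (iN2 : Int) ∧ (jN1 : Int) = (jN2 : Int)) ∨
        ((iN1 : Int) = (jN2 : Int) ∧ (jN1 : Int) = (iN2 : Int)) := by omega
    apply hR
    rcases hcase with ⟨hA, hB⟩ | ⟨hA, hB⟩
    · have hA' : iN1 = iN2 := by exact_mod_cast hA
      have hB' : jN1 = jN2 := by exact_mod_cast hB
      exact Or.inl ⟨by rw [← hgi1, hA', hgi2], by rw [← hgj1, hB', hgj2]⟩
    · have hA' : iN1 = jN2 := by exact_mod_cast hA
      have hB' : jN1 = iN2 := by exact_mod_cast hB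
      exact Or.inr ⟨by rw [← hgi1, hA', hgj2], by rw [← hgj1, hB', hgi2]⟩

theorem pvB_unfold (seqs : List (List String)) :
    detect_sem_pairs_with_only_one_difference_alt seqs =
      (PySem.List.sorted (pvPairsB seqs) (fun t => t.1 * (seqs.length : Int) + t.2)).map
        (fun t => (PySem.List.pyGetD seqs t.1 [], PySem.List.pyGetD seqs t.2 [], (1 : Int))) := by
  unfold detect_sem_pairs_with_only_one_difference_alt
  dsimp only
  have hkeys : (pvGroup (pvFullEntries seqs)).keys = PySem.Set.ofList seqs := by
    rw [pvGroup_keys, pv_fullEntries_map_fst]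
  rw [hkeys]
  have hvals : ∀ h : Int, (pvGroup (pvHalfEntries h (PySem.Set.ofList seqs))).values =
      (PySem.Set.ofList ((pvHalfEntries h (PySem.Set.ofList seqs)).map (fun e => e.1))).map
        (pvHalfBucket h seqs) := by
    intro h
    rw [PySem.Dict.values_eq_map_keys _ (pvGroup_nodup_keys _) [], pvGroup_keys]
    apply List.map_congr_left
    intro k _
    rw [pvGroup_getD]
    rfl
  rw [hvals 0, hvals 1]
  simp only [PySem.List.foldl_append_eq_flatMap, PySem.List.foldl_append_ite,
    List.flatMap_map, List.nil_append]
  congr 1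
  simp only [pvGroup_getD]
  rfl

theorem pvB_eq_pvOut (seqs : List (List String)) :
    detect_sem_pairs_with_only_one_difference_alt seqs = pvOut seqs := by
  rw [pvB_unfold]
  have hsorted : PySem.List.sorted (pvPairsB seqs)
      (fun t => t.1 * (seqs.length : Int) + t.2) = pvTargetInt seqs := by
    apply PySem.List.sorted_eq_of_perm_of_pairwise_lt
    · apply (List.perm_ext_iff_of_nodup (pv_nodup_targetInt seqs) (pv_nodup_pairsB seqs)).mpr
      intro a
      rw [pv_mem_pairsB, pv_mem_targetInt]
    · exact pv_pairwise_key_targetInt seqs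
  rw [hsorted]
  unfold pvTargetInt pvOut
  rw [List.map_map]
  apply List.map_congr_left
  intro u _
  simp [PySem.List.pyGetD_natCast, pvGd]

-- ===== VERDICT (by name: the statement is the Claim_ definition above) =====
theorem detect_sem_pairs_with_only_one_difference_spec : Claim_equal_detect_sem_pairs_with_only_one_difference := by
  intro seqs _
  show _ = _
  rw [pvA_eq_pvOut, pvB_eq_pvOut]
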